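-- pv_equiv track=rewrite | github.com/ramepetla/coding | python/00-tiny-projects/009.english_vocabulary_training_model.py | trash_can
-- ===== SOURCE A (Python) =====
-- def trash_can(raw_list):
--     processed_list = []
--     for word in raw_list:
--         only_letters = word.isalpha()
--         if only_letters == False:
--             pass
--         else:
--             processed_list.append(word.lower())
--     processed_list = list(set(processed_list))
--     processed_list.sort()
--
--     return processed_list
-- ===== SOURCE B (Python) =====
-- def trash_can(raw_list):
--     words = sorted(word.lower() for word in raw_list if word.isalpha())
--     deduped = []
--     for word in words:
--         if not deduped or deduped[-1] != word:
--             deduped.append(word)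
--     return deduped
-- ===== Notes on version B (the rewrite author's own statement) =====
-- stated objective: alternative
-- what changed: Replaces A's build-a-set-then-sort with sort-then-single-pass adjacent dedup: duplicates are removed by comparing each sorted word with the last kept one, so no set is maintained.
import Mathlib
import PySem

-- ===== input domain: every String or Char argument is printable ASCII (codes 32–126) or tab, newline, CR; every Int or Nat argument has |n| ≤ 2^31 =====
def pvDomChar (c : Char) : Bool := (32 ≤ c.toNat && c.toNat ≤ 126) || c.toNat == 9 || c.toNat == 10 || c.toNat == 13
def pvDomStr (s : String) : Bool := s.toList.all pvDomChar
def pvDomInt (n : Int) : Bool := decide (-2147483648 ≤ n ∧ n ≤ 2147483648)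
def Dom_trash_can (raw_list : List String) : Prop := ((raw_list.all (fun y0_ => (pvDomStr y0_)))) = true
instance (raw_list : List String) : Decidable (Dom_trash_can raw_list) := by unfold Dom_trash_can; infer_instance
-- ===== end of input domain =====

-- B replaces A's build-a-set-then-sort with sort-then-adjacent-dedup (alternative decomposition, same cost).

-- ===== PORT A =====
def trash_can (raw_list : List String) : List String :=
  -- for word in raw_list: if word.isalpha(): processed_list.append(word.lower())
  let processed := raw_list.foldl
    (fun acc word =>
      if PySem.Str.strIsalpha word = false then acc else acc ++ [PySem.Str.lower word]) []
  -- processed_list = list(set(processed_list)); processed_list.sort()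
  PySem.List.sorted (PySem.Set.ofList processed) (fun x => x) false

-- ===== PORT B =====
def trash_can_alt (raw_list : List String) : List String :=
  -- words = sorted(word.lower() for word in raw_list if word.isalpha())
  let words := PySem.List.sorted
    ((raw_list.filter (fun word => PySem.Str.strIsalpha word)).map
      (fun word => PySem.Str.lower word)) (fun x => x) false
  -- for word in words: if not deduped or deduped[-1] != word: deduped.append(word)
  words.foldl (fun deduped word =>
    if deduped.getLast? = some word then deduped else deduped ++ [word]) []

-- ===== PRECONDITION & SPEC =====
def Spec_trash_can (raw_list : List String) (out : List String) : Prop := out = trash_can_alt raw_list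
instance (raw_list : List String) (out : List String) : Decidable (Spec_trash_can raw_list out) := by unfold Spec_trash_can; infer_instance

-- ===== CLAIM (what is proved, stated in full; the proofs are below) =====
def Claim_equal_trash_can : Prop := ∀ (raw_list : List String), Dom_trash_can raw_list → Spec_trash_can raw_list (trash_can raw_list)

-- ===== LEMMAS AND PROOFS =====

/-- Functional core of B's dedup loop: `dd p s` keeps each element of `s`
unless it equals the previously kept one `p`. -/
def pvDD (p : Option String) : List String → List String
  | [] => []
  | x :: xs => if p = some x then pvDD p xs else x :: pvDD (some x) xs

lemma pvDD_foldl (s : List String) : ∀ (acc : List String),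
    s.foldl (fun deduped word =>
      if deduped.getLast? = some word then deduped else deduped ++ [word]) acc
    = acc ++ pvDD acc.getLast? s := by
  induction s with
  | nil => intro acc; simp [pvDD]
  | cons x xs ih =>
    intro acc
    simp only [List.foldl_cons, pvDD]
    by_cases h : acc.getLast? = some x
    · simp [h, ih]
    · simp [h, ih]

lemma pvDD_mem {x : String} : ∀ (p : Option String) (s : List String),
    x ∈ s → x ∈ pvDD p s ∨ p = some x := by
  intro p s
  induction s generalizing p with
  | nil => intro h; cases h
  | cons y t ih =>
    intro hx
    by_cases h : p = some y
    · rcases List.mem_cons.mp hx with rfl | hxt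
      · right; exact h
      · rcases ih (some y) hxt with hm | he
        · left; simpa [pvDD, h] using hm
        · right; exact h.trans he
    · simp only [pvDD, if_neg h]
      rcases List.mem_cons.mp hx with rfl | hxt
      · left; exact List.mem_cons_self
      · rcases ih (some y) hxt with hm | he
        · left; exact List.mem_cons_of_mem _ hm
        · left
          injection he with he'
          exact he' ▸ List.mem_cons_self

lemma pvDD_subset {x : String} : ∀ (p : Option String) (s : List String),
    x ∈ pvDD p s → x ∈ s := by
  intro p s
  induction s generalizing p with
  | nil => simp [pvDD]
  | cons y t ih =>
    intro hx
    by_cases h : p = some y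
    · simp only [pvDD, if_pos h] at hx
      exact List.mem_cons_of_mem _ (ih p hx)
    · simp only [pvDD, if_neg h] at hx
      rcases List.mem_cons.mp hx with rfl | hm
      · exact List.mem_cons_self
      · exact List.mem_cons_of_mem _ (ih (some y) hm)

lemma pvDD_pairwise_some : ∀ (s : List String) (a : String),
    s.Pairwise (· ≤ ·) → (∀ x ∈ s, a ≤ x) →
    (pvDD (some a) s).Pairwise (· < ·) ∧ ∀ x ∈ pvDD (some a) s, a < x := by
  intro s
  induction s with
  | nil => intro a _ _; simp [pvDD]
  | cons y t ih =>
    intro a hp hle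
    have hyt : ∀ x ∈ t, y ≤ x := (List.pairwise_cons.mp hp).1
    have hpt : t.Pairwise (· ≤ ·) := (List.pairwise_cons.mp hp).2
    by_cases h : a = y
    · subst h
      simpa [pvDD] using ih a hpt hyt
    · have hay : a < y := lt_of_le_of_ne (hle y List.mem_cons_self) h
      have hrec := ih y hpt hyt
      have hne : ¬ ((some a : Option String) = some y) := by simpa using h
      constructor
      · simp only [pvDD, if_neg hne]
        exact List.pairwise_cons.mpr ⟨hrec.2, hrec.1⟩
      · intro x hx
        simp only [pvDD, if_neg hne] at hx
        rcases List.mem_cons.mp hx with rfl | hm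
        · exact hay
        · exact hay.trans (hrec.2 x hm)

lemma pvDD_pairwise_none (s : List String) (hp : s.Pairwise (· ≤ ·)) :
    (pvDD none s).Pairwise (· < ·) := by
  cases s with
  | nil => simp [pvDD]
  | cons y t =>
    have hyt : ∀ x ∈ t, y ≤ x := (List.pairwise_cons.mp hp).1
    have hpt : t.Pairwise (· ≤ ·) := (List.pairwise_cons.mp hp).2
    have hrec := pvDD_pairwise_some t y hpt hyt
    simp only [pvDD, reduceCtorEq]
    exact List.pairwise_cons.mpr ⟨hrec.2, hrec.1⟩

-- ===== VERDICT (by name: the statement is the Claim_ definition above) =====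
theorem trash_can_spec : Claim_equal_trash_can := by
  intro raw_list _
  unfold Spec_trash_can trash_can trash_can_alt
  have hfun : (fun (acc : List String) (word : String) =>
        if PySem.Str.strIsalpha word = false then acc else acc ++ [PySem.Str.lower word])
      = (fun acc word =>
        if PySem.Str.strIsalpha word = true then acc ++ [PySem.Str.lower word] else acc) := by
    funext acc w; cases h : PySem.Str.strIsalpha w <;> simp
  rw [hfun, PySem.List.foldl_append_if PySem.Str.strIsalpha (fun word => PySem.Str.lower word)]
  simp only [List.nil_append]
  set m := ((raw_list.filter (fun word => PySem.Str.strIsalpha word)).map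
      (fun word => PySem.Str.lower word)) with hm
  -- B: the fold over the sorted list is pvDD none of it
  rw [pvDD_foldl _ []]
  simp only [List.nil_append, List.getLast?_nil]
  set s := PySem.List.sorted m (fun x => x) false with hs
  have hsp : s.Pairwise (· ≤ ·) := by
    simpa using PySem.List.sorted_pairwise m (fun x => x)
  have hlt : (pvDD none s).Pairwise (· < ·) := pvDD_pairwise_none s hsp
  have hperm : (pvDD none s).Perm (PySem.Set.ofList m) := by
    rw [List.perm_ext_iff_of_nodup (show (pvDD none s).Nodup from hlt.imp ne_of_lt)
        (PySem.Set.nodup_ofList m)]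
    intro x
    rw [PySem.Set.mem_ofList]
    constructor
    · intro hx
      have := pvDD_subset none s hx
      rwa [hs, PySem.List.mem_sorted] at this
    · intro hx
      have hxs : x ∈ s := by rw [hs, PySem.List.mem_sorted]; exact hx
      rcases pvDD_mem none s hxs with hm' | he
      · exact hm'
      · cases he
  exact (PySem.List.sorted_eq_of_perm_of_pairwise_lt (PySem.Set.ofList m) (pvDD none s) (fun x => x) hperm hlt)
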